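-- pv_equiv track=rewrite | github.com/t-ding/CoulbourneAnalysis | code.py | make_xticks
-- ===== SOURCE A (Python) =====
-- def make_xticks(times):
-- 	x_ticks = []
-- 	x_ticks_label = []
-- 	res = 0
-- 	max_val = 999
-- 	while max_val > 15:
-- 		res += 5
-- 		max_val = (times[-1] // (60 * res)) + 2
-- 		max_val = int(max_val)
-- 	for i in range(max_val):
-- 		x_ticks += [i*60*res]
-- 		x_ticks_label += [i*res]
-- 	return [x_ticks, x_ticks_label]
-- ===== SOURCE B (Python) =====
-- def make_xticks(times):
--     t = times[-1]
--     res = 5 * max(1, t // 4200 + 1)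
--     n = t // (60 * res) + 2
--     return [[i * 60 * res for i in range(n)], [i * res for i in range(n)]]
-- ===== Notes on version B (the rewrite author's own statement) =====
-- stated objective: alternative
-- what changed: B replaces A's while-loop search for the resolution with a closed-form floor-division formula (res = 5*max(1, t//4200+1) where t is the last element) and builds the tick lists by comprehension instead of repeated list concatenation; A's loop count grows with the last element's value, B does O(1) work besides the (bounded) output.
-- outside the precondition, e.g. on make_xticks([]): A raises IndexError, B raises IndexError
import Mathlib
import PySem

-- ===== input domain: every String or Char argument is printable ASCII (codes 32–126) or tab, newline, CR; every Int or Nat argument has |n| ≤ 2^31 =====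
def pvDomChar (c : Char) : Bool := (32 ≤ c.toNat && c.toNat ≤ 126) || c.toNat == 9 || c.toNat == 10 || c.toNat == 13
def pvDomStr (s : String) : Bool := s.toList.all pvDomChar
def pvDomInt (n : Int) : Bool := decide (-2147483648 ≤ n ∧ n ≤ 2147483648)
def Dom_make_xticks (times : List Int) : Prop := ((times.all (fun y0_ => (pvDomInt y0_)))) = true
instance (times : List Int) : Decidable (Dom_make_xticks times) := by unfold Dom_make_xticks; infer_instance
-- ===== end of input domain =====

-- B replaces A's linear while-loop search for `res` by a closed-form floor-division formula;
-- equivalence of the RETURN VALUES is proved for every nonempty list (A raises IndexError on []).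

-- ===== PORT A =====
-- the while loop of A: state (res, max_val); the hypothesis 0 ≤ res only justifies termination
def pvLoopA (t : Int) (res : Int) (h : 0 ≤ res) : Int × Int :=
  if PySem.Int.floordiv t (60 * (res + 5)) + 2 > 15 then
    pvLoopA t (res + 5) (by omega)
  else
    (res + 5, PySem.Int.floordiv t (60 * (res + 5)) + 2)
termination_by (t - 840 * res).toNat
decreasing_by
  rename_i hc
  have hb : (0:Int) < 60 * (res + 5) := by omega
  have h14 : (14:Int) * (60 * (res + 5)) ≤ t :=
    (PySem.Int.le_floordiv_iff_mul_le hb).mp (by omega)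
  omega

def make_xticks (times : List Int) : List (List Int) :=
  match PySem.List.pyGet? times (-1) with
  | none => []       -- IndexError in Python; excluded by Pre_
  | some t =>
    let p := pvLoopA t 0 (by omega)
    let res := p.1
    let max_val := p.2
    let q := (PySem.List.pyRange 0 max_val 1).foldl
      (fun (acc : List Int × List Int) i => (acc.1 ++ [i * 60 * res], acc.2 ++ [i * res]))
      ([], [])
    [q.1, q.2]

-- ===== PORT B =====
def make_xticks_alt (times : List Int) : List (List Int) :=
  match PySem.List.pyGet? times (-1) with
  | none => []       -- IndexError in Python; excluded by Pre_
  | some t =>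
    let res := 5 * max 1 (PySem.Int.floordiv t 4200 + 1)
    let n := PySem.Int.floordiv t (60 * res) + 2
    [(PySem.List.pyRange 0 n 1).map (fun i => i * 60 * res),
     (PySem.List.pyRange 0 n 1).map (fun i => i * res)]

-- ===== PRECONDITION & SPEC =====
-- A reads the last element: it raises IndexError exactly on the empty list.
def Pre_make_xticks (times : List Int) : Prop := times ≠ []
instance (times : List Int) : Decidable (Pre_make_xticks times) := by unfold Pre_make_xticks; infer_instance
def pvWitness_make_xticks : List Int := ([4500])

def Spec_make_xticks (times : List Int) (out : List (List Int)) : Prop := out = make_xticks_alt times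
instance (times : List Int) (out : List (List Int)) : Decidable (Spec_make_xticks times out) := by unfold Spec_make_xticks; infer_instance

-- ===== CLAIM (what is proved, stated in full; the proofs are below) =====
def Claim_equal_make_xticks : Prop := ∀ (times : List Int), Dom_make_xticks times → Pre_make_xticks times → Spec_make_xticks times (make_xticks times)

-- ===== LEMMAS AND PROOFS =====

-- the while loop computes the closed form: smallest admissible multiple of 5 past res = 5*m
theorem pvLoopA_eq (N : Nat) : ∀ (t r m : Int) (hr : 0 ≤ r), r = 5 * m → 0 ≤ m →
    (PySem.Int.floordiv t 4200 - m).toNat ≤ N →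
    pvLoopA t r hr =
      (5 * max (m + 1) (PySem.Int.floordiv t 4200 + 1),
       PySem.Int.floordiv t (60 * (5 * max (m + 1) (PySem.Int.floordiv t 4200 + 1))) + 2) := by
  induction N with
  | zero =>
    intro t r m hr h5 h0 hN
    subst h5
    have hle : PySem.Int.floordiv t 4200 ≤ m := by omega
    rw [pvLoopA]
    have hb : (0:Int) < 60 * (5 * m + 5) := by omega
    have hguard : ¬ (PySem.Int.floordiv t (60 * (5 * m + 5)) + 2 > 15) := by
      intro hg
      have h14 : (14:Int) * (60 * (5 * m + 5)) ≤ t :=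
        (PySem.Int.le_floordiv_iff_mul_le hb).mp (by omega)
      have : m + 1 ≤ PySem.Int.floordiv t 4200 :=
        (PySem.Int.le_floordiv_iff_mul_le (by omega : (0:Int) < 4200)).mpr (by nlinarith)
      omega
    rw [if_neg hguard]
    rw [show max (m + 1) (PySem.Int.floordiv t 4200 + 1) = m + 1 from by omega]
    rw [show 5 * m + 5 = 5 * (m + 1) from by ring]
  | succ N ih =>
    intro t r m hr h5 h0 hN
    subst h5
    rw [pvLoopA]
    by_cases hg : PySem.Int.floordiv t (60 * (5 * m + 5)) + 2 > 15
    · have hb : (0:Int) < 60 * (5 * m + 5) := by omega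
      have h14 : (14:Int) * (60 * (5 * m + 5)) ≤ t :=
        (PySem.Int.le_floordiv_iff_mul_le hb).mp (by omega)
      have hbig : m + 1 ≤ PySem.Int.floordiv t 4200 :=
        (PySem.Int.le_floordiv_iff_mul_le (by omega : (0:Int) < 4200)).mpr (by nlinarith)
      rw [if_pos hg]
      have hstep := ih t (5 * m + 5) (m + 1) (by omega) (by ring) (by omega) (by omega)
      rw [show max (m + 1 + 1) (PySem.Int.floordiv t 4200 + 1)
            = max (m + 1) (PySem.Int.floordiv t 4200 + 1) from by omega] at hstep
      exact hstep
    · have hb : (0:Int) < 60 * (5 * m + 5) := by omega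
      have hsmall : ¬ (m + 1 ≤ PySem.Int.floordiv t 4200) := by
        intro hbig
        have h42 : (m + 1) * 4200 ≤ t :=
          (PySem.Int.le_floordiv_iff_mul_le (by omega : (0:Int) < 4200)).mp hbig
        have : (14:Int) ≤ PySem.Int.floordiv t (60 * (5 * m + 5)) :=
          (PySem.Int.le_floordiv_iff_mul_le hb).mpr (by nlinarith)
        omega
      rw [if_neg hg]
      rw [show max (m + 1) (PySem.Int.floordiv t 4200 + 1) = m + 1 from by omega]
      rw [show 5 * m + 5 = 5 * (m + 1) from by ring]

-- the paired-append fold of A's for loop builds exactly the two mapped lists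
theorem pvFoldPair (c d : Int) : ∀ (l : List Int) (a b : List Int),
    l.foldl (fun (acc : List Int × List Int) i => (acc.1 ++ [i * 60 * c], acc.2 ++ [i * d])) (a, b)
      = (a ++ l.map (fun i => i * 60 * c), b ++ l.map (fun i => i * d)) := by
  intro l
  induction l with
  | nil => intro a b; simp [List.foldl]
  | cons x xs ih =>
    intro a b
    simp only [List.foldl, List.map, ih, List.append_assoc, List.cons_append, List.nil_append]

theorem make_xticks_spec : Claim_equal_make_xticks := by
  intro times _ hpre
  unfold Spec_make_xticks
  cases hget : PySem.List.pyGet? times (-1) with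
  | none =>
    rw [PySem.List.pyGet?_neg_one, List.getLast?_eq_none_iff] at hget
    exact absurd hget hpre
  | some t =>
    simp only [make_xticks, make_xticks_alt, hget]
    rw [pvLoopA_eq (PySem.Int.floordiv t 4200).toNat t 0 0]
    · rw [pvFoldPair]
      simp only [List.nil_append]
      norm_num
    all_goals norm_num
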